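-- pv_equiv track=rewrite | github.com/lymagics/Python | Cryptography/des.py | complite_block
-- ===== SOURCE A (Python) =====
-- def complite_block(num_arr:int):
--     missing = 0
--     length = len(num_arr)
--     while length%8 != 0:
--         length += 1
--         missing += 1
--     for i in range(missing):
--         num_arr.append(0)
--     return num_arr
-- ===== SOURCE B (Python) =====
-- def complite_block(num_arr):
--     missing = (-len(num_arr)) % 8
--     for _ in range(missing):
--         num_arr.append(0)
--     return num_arr
-- ===== Notes on version B (the rewrite author's own statement) =====
-- stated objective: simpler
-- what changed: Replaces A's while-loop that counts missing elements one at a time with the closed-form count (-len) % 8, keeping the in-place append loop.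
import Mathlib
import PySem

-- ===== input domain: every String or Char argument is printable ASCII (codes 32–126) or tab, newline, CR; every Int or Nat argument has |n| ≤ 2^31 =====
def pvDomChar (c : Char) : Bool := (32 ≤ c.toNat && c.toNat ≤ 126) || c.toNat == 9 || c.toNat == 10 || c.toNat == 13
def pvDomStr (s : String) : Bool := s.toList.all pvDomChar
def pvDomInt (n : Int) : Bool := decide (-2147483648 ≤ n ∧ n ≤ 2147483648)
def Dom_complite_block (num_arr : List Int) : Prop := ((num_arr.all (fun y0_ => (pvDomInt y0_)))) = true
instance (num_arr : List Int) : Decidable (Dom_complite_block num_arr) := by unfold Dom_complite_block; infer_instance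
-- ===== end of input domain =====

-- B computes the padding count in closed form ((-len) % 8) instead of A's while-loop counting up one step at a time; same in-place append of zeros (simpler). Note: A mutates num_arr in place; the equivalence proved is about the return value.


-- ===== PORT A =====
-- while length%8 != 0: length += 1; missing += 1   (structural recursion on the loop)
def compliteWhile (length missing : Nat) : Nat :=
  if length % 8 ≠ 0 then compliteWhile (length + 1) (missing + 1) else missing
termination_by (8 - length % 8) % 8
decreasing_by omega

def complite_block (num_arr : List Int) : List Int :=
  let missing := compliteWhile num_arr.length 0
  (PySem.List.pyRange 0 (missing : Int) 1).foldl (fun acc _ => acc ++ [0]) num_arr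

-- ===== PORT B =====
def complite_block_alt (num_arr : List Int) : List Int :=
  let missing := PySem.Int.mod (-(num_arr.length : Int)) 8
  (PySem.List.pyRange 0 missing 1).foldl (fun acc _ => acc ++ [0]) num_arr

-- ===== PRECONDITION & SPEC =====
def Spec_complite_block (num_arr : List Int) (out : List Int) : Prop := out = complite_block_alt num_arr
instance (num_arr : List Int) (out : List Int) : Decidable (Spec_complite_block num_arr out) := by unfold Spec_complite_block; infer_instance

-- ===== CLAIM (what is proved, stated in full; the proofs are below) =====
def Claim_equal_complite_block : Prop := ∀ (num_arr : List Int), Dom_complite_block num_arr → Spec_complite_block num_arr (complite_block num_arr)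

-- ===== LEMMAS AND PROOFS =====
lemma compliteWhile_eq (length missing : Nat) :
    compliteWhile length missing = missing + (8 - length % 8) % 8 := by
  fun_induction compliteWhile length missing with
  | case1 length missing h ih =>
      rw [ih]; omega
  | case2 length missing h => omega

lemma missing_eq (n : Nat) :
    ((compliteWhile n 0 : Nat) : Int) = PySem.Int.mod (-(n : Int)) 8 := by
  rw [compliteWhile_eq]
  have := PySem.Int.floordiv_mul_add_mod (-(n : Int)) 8
  have h1 := PySem.Int.mod_nonneg (-(n : Int)) (b := 8) (by omega)
  have h2 := PySem.Int.mod_lt (-(n : Int)) (b := 8) (by omega)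
  omega

-- ===== VERDICT (by name: the statement is the Claim_ definition above) =====
theorem complite_block_spec : Claim_equal_complite_block := by
  intro num_arr _
  unfold Spec_complite_block complite_block complite_block_alt
  simp only []
  rw [missing_eq]
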